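-- pv_equiv track=rewrite | github.com/blurosies/tour-de-hanoi | Tours_de_hanoi_complet.py | filter_min
-- ===== SOURCE A (Python) =====
-- def filter_min(joueurs, cle):
--     valeur_min = 100000000
--     x = []
--     n = []
--     for nom in joueurs :
--         valeur = joueurs[nom][cle]
--         if valeur < valeur_min :
--             x.clear()
--             n.clear()
--             x.append(valeur)
--             n.append(nom)
--             valeur_min = valeur
--         elif valeur == valeur_min :
--             x.append(valeur)
--             n.append(nom)
--     return n, x
-- ===== SOURCE B (Python) =====
-- def filter_min(joueurs, cle):
--     # two-pass: compute the capped minimum, then filter the names achieving it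
--     m = min([100000000] + [joueurs[nom][cle] for nom in joueurs])
--     n = [nom for nom in joueurs if joueurs[nom][cle] == m]
--     return n, [m] * len(n)
-- ===== Notes on version B (the rewrite author's own statement) =====
-- stated objective: simpler
-- what changed: B replaces A's single-pass live tie tracking (clearing and rebuilding both result lists whenever a smaller value appears) by two plain passes: take the minimum of the values capped at the 100000000 sentinel, then filter the names whose value equals it.
import Mathlib
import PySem

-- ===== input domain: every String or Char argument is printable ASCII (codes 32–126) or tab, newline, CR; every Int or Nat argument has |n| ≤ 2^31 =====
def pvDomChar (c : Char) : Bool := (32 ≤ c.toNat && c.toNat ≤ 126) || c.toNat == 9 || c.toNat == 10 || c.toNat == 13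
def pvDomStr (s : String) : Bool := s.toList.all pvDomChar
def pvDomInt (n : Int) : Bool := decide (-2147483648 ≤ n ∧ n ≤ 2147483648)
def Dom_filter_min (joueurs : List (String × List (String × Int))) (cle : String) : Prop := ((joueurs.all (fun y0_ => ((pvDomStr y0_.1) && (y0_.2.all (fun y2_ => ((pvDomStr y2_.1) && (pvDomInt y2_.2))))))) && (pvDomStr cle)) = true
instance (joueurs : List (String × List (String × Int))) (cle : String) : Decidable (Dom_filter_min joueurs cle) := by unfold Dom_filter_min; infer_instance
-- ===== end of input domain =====

-- B is a simpler two-pass version of A (capped minimum, then filter); equivalence is on the return value only.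

-- shared helper: the value joueurs[nom][cle] (Pre_ guarantees the key is present)
def pvVal (cle : String) (p : String × List (String × Int)) : Int :=
  PySem.Dict.getD (PySem.Dict.mk p.2) cle 0

-- ===== PORT A =====
-- A's loop body, step for step (clear-and-rebuild on a strict drop, append on a tie)
def pvStepA (cle : String) (st : Int × List Int × List String) (p : String × List (String × Int)) :
    Int × List Int × List String :=
  let valeur := pvVal cle p
  if valeur < st.1 then (valeur, [valeur], [p.1])
  else if valeur = st.1 then (st.1, st.2.1 ++ [valeur], st.2.2 ++ [p.1])
  else st

def filter_min (joueurs : List (String × List (String × Int))) (cle : String) : List String × List Int :=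
  let r := joueurs.foldl (pvStepA cle) (100000000, [], [])
  (r.2.2, r.2.1)

-- ===== PORT B =====
def filter_min_alt (joueurs : List (String × List (String × Int))) (cle : String) : List String × List Int :=
  let m := (PySem.List.min? ((100000000 : Int) :: joueurs.map (pvVal cle)) (fun x => x)).getD 0
  let n := (joueurs.filter (fun p => pvVal cle p == m)).map Prod.fst
  (n, List.replicate n.length m)

-- ===== PRECONDITION & SPEC =====
-- Pre_ excludes (a) inputs where some player's record lacks cle, on which A raises KeyError, and
-- (b) assoc lists with duplicate names (outer or inner), on which the Python-dict collapsing of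
-- duplicates is not expressible in the assoc-list convention (lookup = first match).
def Pre_filter_min (joueurs : List (String × List (String × Int))) (cle : String) : Prop :=
  (joueurs.map Prod.fst).Nodup ∧
  ∀ p ∈ joueurs, (p.2.map Prod.fst).Nodup ∧ (PySem.Dict.get? (PySem.Dict.mk p.2) cle).isSome = true
instance (joueurs : List (String × List (String × Int))) (cle : String) : Decidable (Pre_filter_min joueurs cle) := by unfold Pre_filter_min; infer_instance

def pvWitness_filter_min : (List (String × List (String × Int))) × String :=
  ([("a", [("k", 3)]), ("b", [("k", 3)])], "k")

def Spec_filter_min (joueurs : List (String × List (String × Int))) (cle : String) (out : List String × List Int) : Prop := out = filter_min_alt joueurs cle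
instance (joueurs : List (String × List (String × Int))) (cle : String) (out : List String × List Int) : Decidable (Spec_filter_min joueurs cle out) := by unfold Spec_filter_min; infer_instance

-- ===== CLAIM (what is proved, stated in full; the proofs are below) =====
def Claim_equal_filter_min : Prop := ∀ (joueurs : List (String × List (String × Int))) (cle : String), Dom_filter_min joueurs cle → Pre_filter_min joueurs cle → Spec_filter_min joueurs cle (filter_min joueurs cle)

-- ===== LEMMAS AND PROOFS =====

-- the running capped minimum after the prefix L, started from m
def pvM (cle : String) (L : List (String × List (String × Int))) (m : Int) : Int :=
  L.foldl (fun a p => min a (pvVal cle p)) m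

-- the name list A's loop holds after processing L from state (m, ·, ns)
def pvNS (cle : String) (L : List (String × List (String × Int))) (m : Int) (ns : List String) : List String :=
  (if pvM cle L m = m then ns else []) ++ (L.filter (fun p => pvVal cle p == pvM cle L m)).map Prod.fst

lemma pvM_le (cle : String) (L : List (String × List (String × Int))) :
    ∀ m : Int, pvM cle L m ≤ m := by
  induction L with
  | nil => intro m; simp [pvM]
  | cons p L ih =>
      intro m
      calc pvM cle (p :: L) m = pvM cle L (min m (pvVal cle p)) := by simp [pvM, List.foldl_cons]
        _ ≤ min m (pvVal cle p) := ih _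
        _ ≤ m := min_le_left _ _

lemma pvLoopA (cle : String) (L : List (String × List (String × Int))) :
    ∀ (m : Int) (ns : List String),
      L.foldl (pvStepA cle) (m, List.replicate ns.length m, ns) =
        (pvM cle L m, List.replicate (pvNS cle L m ns).length (pvM cle L m), pvNS cle L m ns) := by
  induction L with
  | nil => intro m ns; simp [pvM, pvNS]
  | cons p L ih =>
      intro m ns
      have hMle : pvM cle L (min m (pvVal cle p)) ≤ min m (pvVal cle p) := pvM_le cle L _
      have hMcons : pvM cle (p :: L) m = pvM cle L (min m (pvVal cle p)) := by
        simp [pvM, List.foldl_cons]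
      rcases lt_trichotomy (pvVal cle p) m with hlt | heq | hgt
      · -- strict drop: clear and restart from (v, [v], [p.1])
        have hstep : pvStepA cle (m, List.replicate ns.length m, ns) p
            = (pvVal cle p, List.replicate [p.1].length (pvVal cle p), [p.1]) := by
          simp [pvStepA, hlt]
        have hmin : min m (pvVal cle p) = pvVal cle p := min_eq_right hlt.le
        rw [List.foldl_cons, hstep, ih (pvVal cle p) [p.1]]
        have hM : pvM cle (p :: L) m = pvM cle L (pvVal cle p) := by rw [hMcons, hmin]
        have hne : pvM cle (p :: L) m ≠ m := by
          rw [hM]; have := pvM_le cle L (pvVal cle p); omega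
        have hNS : pvNS cle (p :: L) m ns = pvNS cle L (pvVal cle p) [p.1] := by
          unfold pvNS
          rw [if_neg hne, hM, List.filter_cons]
          by_cases hpm : pvVal cle p = pvM cle L (pvVal cle p)
          · rw [if_pos (beq_iff_eq.mpr hpm), if_pos hpm.symm]
            simp
          · rw [if_neg (by simpa using hpm), if_neg (fun h => hpm h.symm)]
        rw [hM, hNS]
      · -- tie with the running minimum: append
        have hstep : pvStepA cle (m, List.replicate ns.length m, ns) p
            = (m, List.replicate (ns ++ [p.1]).length m, ns ++ [p.1]) := by
          simp [pvStepA, heq, List.replicate_succ']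
        have hmin : min m (pvVal cle p) = m := by rw [heq]; exact min_self m
        have hM : pvM cle (p :: L) m = pvM cle L m := by rw [hMcons, hmin]
        rw [List.foldl_cons, hstep, ih m (ns ++ [p.1])]
        have hNS : pvNS cle (p :: L) m ns = pvNS cle L m (ns ++ [p.1]) := by
          unfold pvNS
          rw [hM, List.filter_cons]
          by_cases hMm : pvM cle L m = m
          · rw [if_pos hMm, if_pos hMm, if_pos (beq_iff_eq.mpr (heq.trans hMm.symm))]
            simp
          · have hpm : ¬ pvVal cle p = pvM cle L m := by rw [heq]; exact fun h => hMm h.symm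
            rw [if_neg hMm, if_neg hMm, if_neg (by simpa using hpm)]
        rw [hM, hNS]
      · -- larger value: state unchanged
        have hstep : pvStepA cle (m, List.replicate ns.length m, ns) p
            = (m, List.replicate ns.length m, ns) := by
          have h1 : ¬ pvVal cle p < m := by omega
          have h2 : ¬ pvVal cle p = m := by omega
          simp [pvStepA, h1, h2]
        have hmin : min m (pvVal cle p) = m := min_eq_left hgt.le
        have hM : pvM cle (p :: L) m = pvM cle L m := by rw [hMcons, hmin]
        rw [List.foldl_cons, hstep, ih m ns]
        have hNS : pvNS cle (p :: L) m ns = pvNS cle L m ns := by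
          unfold pvNS
          rw [hM, List.filter_cons]
          have hle : pvM cle L m ≤ m := pvM_le cle L m
          have hpm : ¬ pvVal cle p = pvM cle L m := by omega
          simp [hpm]
        rw [hM, hNS]

-- ===== VERDICT (by name: the statement is the Claim_ definition above) =====
theorem filter_min_spec : Claim_equal_filter_min := by
  intro joueurs cle _ _
  unfold Spec_filter_min filter_min filter_min_alt
  have h0 : (List.replicate ([] : List String).length (100000000 : Int)) = [] := by simp
  have hA := pvLoopA cle joueurs 100000000 []
  rw [h0] at hA
  rw [hA]
  have hmin : (PySem.List.min? ((100000000 : Int) :: joueurs.map (pvVal cle)) (fun x => x)).getD 0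
      = pvM cle joueurs 100000000 := by
    rw [PySem.List.min?_id_cons]
    simp [pvM, List.foldl_map]
  have hNS : pvNS cle joueurs 100000000 []
      = (joueurs.filter (fun p => pvVal cle p == pvM cle joueurs 100000000)).map Prod.fst := by
    unfold pvNS
    by_cases h : pvM cle joueurs 100000000 = 100000000 <;> simp [h]
  simp only [hmin, hNS]
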